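-- pv_equiv track=rewrite | github.com/evanmiltenburg/EvaluationRules | analyse_templates.py | select_ratios
-- ===== SOURCE A (Python) =====
-- def select_ratios(rows, max_per_category, add_last):
--     "Select rows with ratios along the entire range of ratios."
--     selection = []
--     last = None
--     for row in rows:
--         ratio = row[-1]
--         relevant_digit = ratio[-2]
--         if relevant_digit != last:
--             selection.append(row)
--             count = 1
--             last = relevant_digit
--         elif count < max_per_category:
--             selection.append(row)
--             count += 1
--     if add_last:
--         selection.append(rows[-1])
--     return selection
-- ===== SOURCE B (Python) =====
-- def select_ratios(rows, max_per_category, add_last):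
--     "Select rows with ratios along the entire range of ratios."
--     selection = []
--     cap = max(1, max_per_category)
--     i, n = 0, len(rows)
--     while i < n:
--         key = rows[i][-1][-2]
--         j = i
--         while j < n and rows[j][-1][-2] == key:
--             j += 1
--         selection.extend(rows[i:min(i + cap, j)])
--         i = j
--     if add_last:
--         selection.append(rows[-1])
--     return selection
-- ===== Notes on version B (the rewrite author's own statement) =====
-- stated objective: alternative
-- what changed: Replaces A's streaming last/count state machine with a two-pointer run scanner: find each maximal run of rows sharing the same relevant digit, then slice off its first max(1, max_per_category) rows at once.
import Mathlib
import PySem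

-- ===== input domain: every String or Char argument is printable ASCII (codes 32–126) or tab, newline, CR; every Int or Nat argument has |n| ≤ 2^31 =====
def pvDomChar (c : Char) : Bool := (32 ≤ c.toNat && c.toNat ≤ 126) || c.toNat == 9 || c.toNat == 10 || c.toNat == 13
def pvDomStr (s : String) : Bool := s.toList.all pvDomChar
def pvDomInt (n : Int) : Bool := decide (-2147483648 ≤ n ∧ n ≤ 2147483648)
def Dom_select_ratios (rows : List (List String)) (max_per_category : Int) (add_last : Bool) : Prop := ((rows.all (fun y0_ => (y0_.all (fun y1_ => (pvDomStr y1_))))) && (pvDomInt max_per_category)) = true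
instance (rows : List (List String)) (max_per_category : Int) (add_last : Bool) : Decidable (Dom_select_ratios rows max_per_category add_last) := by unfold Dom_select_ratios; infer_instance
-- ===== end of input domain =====

-- B replaces A's streaming last/count state machine with a run scanner that takes the
-- first max(1, max_per_category) rows of each maximal run of equal relevant digits
-- (objective: alternative; same O(n) cost).


-- row[-1][-2]: the relevant digit of a row (defaults only fire outside Pre_)
def pvKey (row : List String) : Char :=
  (PySem.Str.pyGet? ((PySem.List.pyGet? row (-1)).getD "") (-2)).getD ' '

-- ===== PORT A =====
-- the loop body of A: state (selection, last, count)
def stepA (max_per_category : Int) (st : List (List String) × Option Char × Int)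
    (row : List String) : List (List String) × Option Char × Int :=
  let relevant_digit := pvKey row
  if some relevant_digit ≠ st.2.1 then (st.1 ++ [row], some relevant_digit, 1)
  else if st.2.2 < max_per_category then (st.1 ++ [row], st.2.1, st.2.2 + 1)
  else st

def select_ratios (rows : List (List String)) (max_per_category : Int) (add_last : Bool) : List (List String) :=
  let st := rows.foldl (stepA max_per_category) ([], none, 0)
  if add_last then st.1 ++ [(PySem.List.pyGet? rows (-1)).getD []] else st.1

-- ===== PORT B =====
-- the outer while loop of Source B: consume one maximal run per step, keep its first cap rows
def selRuns (max_per_category : Int) : List (List String) → List (List String)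
  | [] => []
  | r :: rest =>
      (r :: rest.takeWhile (fun y => pvKey y == pvKey r)).take (max 1 max_per_category).toNat
        ++ selRuns max_per_category (rest.dropWhile (fun y => pvKey y == pvKey r))
termination_by l => l.length
decreasing_by
  simpa using Nat.lt_succ_of_le (List.length_dropWhile_le _ _)

def select_ratios_alt (rows : List (List String)) (max_per_category : Int) (add_last : Bool) : List (List String) :=
  selRuns max_per_category rows
    ++ (if add_last then [(PySem.List.pyGet? rows (-1)).getD []] else [])

-- ===== PRECONDITION & SPEC =====
-- Pre_ excludes exactly the inputs where Python A raises IndexError: an empty row,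
-- a last field shorter than 2 characters, or empty rows with add_last.
def Pre_select_ratios (rows : List (List String)) (max_per_category : Int) (add_last : Bool) : Prop :=
  (add_last = true → rows ≠ []) ∧
  ∀ row ∈ rows, row ≠ [] ∧ 2 ≤ (row.getLastD "").toList.length
instance (rows : List (List String)) (max_per_category : Int) (add_last : Bool) : Decidable (Pre_select_ratios rows max_per_category add_last) := by unfold Pre_select_ratios; infer_instance

def pvWitness_select_ratios : List (List String) × Int × Bool :=
  ([["a", "0.15"], ["b", "0.17"], ["c", "0.23"]], 1, true)

def Spec_select_ratios (rows : List (List String)) (max_per_category : Int) (add_last : Bool) (out : List (List String)) : Prop := out = select_ratios_alt rows max_per_category add_last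
instance (rows : List (List String)) (max_per_category : Int) (add_last : Bool) (out : List (List String)) : Decidable (Spec_select_ratios rows max_per_category add_last out) := by unfold Spec_select_ratios; infer_instance

-- ===== CLAIM (what is proved, stated in full; the proofs are below) =====
def Claim_equal_select_ratios : Prop := ∀ (rows : List (List String)) (max_per_category : Int) (add_last : Bool), Dom_select_ratios rows max_per_category add_last → Pre_select_ratios rows max_per_category add_last → Spec_select_ratios rows max_per_category add_last (select_ratios rows max_per_category add_last)

-- ===== LEMMAS AND PROOFS =====

-- A's loop body as a recursion on the rows, carrying the same (last, count) state
def chainA (mpc : Int) : List (List String) → Option Char → Int → List (List String)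
  | [], _, _ => []
  | r :: rs, last, count =>
      if some (pvKey r) ≠ last then r :: chainA mpc rs (some (pvKey r)) 1
      else if count < mpc then r :: chainA mpc rs last (count + 1)
      else chainA mpc rs last count

-- A's foldl equals chainA, by induction generalizing the accumulator
theorem foldl_eq_chainA (mpc : Int) (rows : List (List String))
    (sel : List (List String)) (last : Option Char) (count : Int) :
    (rows.foldl (stepA mpc) (sel, last, count)).1 = sel ++ chainA mpc rows last count := by
  induction rows generalizing sel last count with
  | nil => simp [chainA]
  | cons r rs ih =>
      rw [List.foldl_cons]
      by_cases h1 : some (pvKey r) ≠ last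
      · rw [show stepA mpc (sel, last, count) r = (sel ++ [r], some (pvKey r), 1) by
          simp [stepA, h1], ih, chainA, if_pos h1]
        simp
      · by_cases h2 : count < mpc
        · rw [show stepA mpc (sel, last, count) r = (sel ++ [r], last, count + 1) by
            simp [stepA, h1, h2], ih, chainA, if_neg h1, if_pos h2]
          simp
        · rw [show stepA mpc (sel, last, count) r = (sel, last, count) by
            simp [stepA, h1, h2], ih, chainA, if_neg h1, if_neg h2]

-- chainA with a stale (some d) state whose run is over ignores count
theorem chainA_count_irrel (mpc : Int) (ys : List (List String)) (d : Char)
    (h : ∀ x ∈ ys.head?, pvKey x ≠ d) (c1 c2 : Int) :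
    chainA mpc ys (some d) c1 = chainA mpc ys (some d) c2 := by
  cases ys with
  | nil => rfl
  | cons y ys =>
      have hy : pvKey y ≠ d := h y (by simp)
      simp [chainA, hy]

theorem head?_dropWhile_false {α : Type} (p : α → Bool) (l : List α) (x : α)
    (h : (l.dropWhile p).head? = some x) : p x = false := by
  induction l with
  | nil => simp at h
  | cons a l ih =>
      by_cases ha : p a
      · exact ih (by simpa [List.dropWhile_cons, ha] using h)
      · simp [List.dropWhile_cons, ha] at h
        simpa [← h] using ha

-- consuming one run: chainA inside a run takes (mpc - count) more rows of the run
theorem chainA_run (mpc : Int) (ys : List (List String)) (d : Char) (count : Int) :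
    chainA mpc ys (some d) count =
      (ys.takeWhile (fun y => pvKey y == d)).take (mpc - count).toNat
        ++ chainA mpc (ys.dropWhile (fun y => pvKey y == d)) (some d) count := by
  induction ys generalizing count with
  | nil => simp [chainA]
  | cons y ys ih =>
      by_cases hy : pvKey y = d
      · have hb : (pvKey y == d) = true := by simp [hy]
        have hne : ¬ some (pvKey y) ≠ some d := by simp [hy]
        by_cases hc : count < mpc
        · have htn : (mpc - count).toNat = ((mpc - (count + 1)).toNat) + 1 := by omega
          have hcont : chainA mpc (ys.dropWhile (fun y => pvKey y == d)) (some d) (count + 1)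
              = chainA mpc (ys.dropWhile (fun y => pvKey y == d)) (some d) count := by
            apply chainA_count_irrel
            intro x hx
            have := head?_dropWhile_false _ _ _ hx
            simpa using this
          rw [chainA, if_neg hne, if_pos hc, ih (count + 1), hcont]
          simp [List.takeWhile_cons, List.dropWhile_cons, hb, htn]
        · have htn : (mpc - count).toNat = 0 := by omega
          rw [chainA, if_neg hne, if_neg hc, ih count]
          simp [List.takeWhile_cons, List.dropWhile_cons, hb, htn]
      · have hb : (pvKey y == d) = false := by simpa using hy
        simp [List.takeWhile_cons, List.dropWhile_cons, hb]

-- chainA at a fresh group boundary equals B's run scanner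
theorem chainA_eq_selRuns (mpc : Int) (rows : List (List String)) (last : Option Char)
    (h : ∀ x ∈ rows.head?, some (pvKey x) ≠ last) (count : Int) :
    chainA mpc rows last count = selRuns mpc rows := by
  revert h
  induction rows using selRuns.induct generalizing last count with
  | case1 =>
      intro h
      rw [selRuns]; rfl
  | case2 r rs ih =>
      intro h
      have hr : some (pvKey r) ≠ last := h r (by simp)
      have hk : (max 1 mpc).toNat = (mpc - 1).toNat + 1 := by omega
      rw [chainA, if_pos hr, chainA_run, selRuns]
      rw [hk, List.take_succ_cons, List.cons_append]
      congr 1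
      · congr 1
        apply ih
        intro x hx
        have := head?_dropWhile_false _ _ _ hx
        simp only [beq_eq_false_iff_ne, ne_eq] at this
        simp [this]

-- ===== VERDICT (by name: the statement is the Claim_ definition above) =====
theorem select_ratios_spec : Claim_equal_select_ratios := by
  intro rows mpc add_last _ _
  unfold Spec_select_ratios select_ratios select_ratios_alt
  have h1 := foldl_eq_chainA mpc rows [] none 0
  have h2 := chainA_eq_selRuns mpc rows none (by intro x _; simp) 0
  cases add_last <;> simp [h1, h2]
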